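-- pv_equiv track=rewrite | github.com/Zadest/PodcastNLP | dataCollector.py | _int_to_written_number
-- ===== SOURCE A (Python) =====
-- EINERNAMEN = ("",
--             "ein",
--             "zwei",
--             "drei",
--             "vier",
--             "fuenf",
--             "sechs",
--             "sieben",
--             "acht",
--             "neun")
--
-- ZEHNERNAMEN = ("",
--             "",
--             "zwanzig",
--             "dreissig",
--             "vierzig",
--             "fuenfzig",
--             "sechzig",
--             "siebzig",
--             "achtzig",
--             "neunzig")
--
-- def _int_to_written_number(index: int):
--     if index >= 100:
--         hunderter = index // 100
--         _,zehner,einer,zehner_einer_text = _int_to_written_number(index % 100)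
--         text = EINERNAMEN[hunderter]+"hundert"+zehner_einer_text if zehner_einer_text else EINERNAMEN[hunderter]+"hundert"
--         return hunderter, zehner, einer, text
--
--     if index >= 20:
--         zehner = index // 10
--         einer = index % 10
--         text = EINERNAMEN[einer]+"und"+ZEHNERNAMEN[zehner] if einer != 0 else ZEHNERNAMEN[zehner]
--         return 0, zehner, einer, text
--
--     if index >= 13:
--         einer = index % 10
--         return 0,1,einer,EINERNAMEN[einer]+"zehn"
--
--     if index == 12:
--         return 0,1,2,"zwoelf"
--
--     if index == 11:
--         return 0,1,1,"elf"
--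
--     if index == 10:
--         return 0,1,0,"zehn"
--
--     if index > 1:
--         return 0,0,index,EINERNAMEN[index]
--
--     if index == 1:
--         return 0,0,1,"eins"
--
--     return None, None, None, None
-- ===== SOURCE B (Python) =====
-- EINERNAMEN = ("",
--             "ein",
--             "zwei",
--             "drei",
--             "vier",
--             "fuenf",
--             "sechs",
--             "sieben",
--             "acht",
--             "neun")
--
-- ZEHNERNAMEN = ("",
--             "",
--             "zwanzig",
--             "dreissig",
--             "vierzig",
--             "fuenfzig",
--             "sechzig",
--             "siebzig",
--             "achtzig",
--             "neunzig")
--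
-- _SPECIAL = {1: "eins", 11: "elf", 12: "zwoelf"}
--
-- def _two_digit_text(n):
--     s = _SPECIAL.get(n)
--     if s is not None:
--         return s
--     z, e = divmod(n, 10)
--     if n < 10:
--         return EINERNAMEN[n]
--     if n < 20:
--         return EINERNAMEN[e] + "zehn"
--     return ZEHNERNAMEN[z] if e == 0 else EINERNAMEN[e] + "und" + ZEHNERNAMEN[z]
--
-- # all 100 two-digit decompositions, precomputed once at module load
-- _TABLE = [(None, None, "") if n == 0 else (n // 10, n % 10, _two_digit_text(n))
--           for n in range(100)]
--
-- def _int_to_written_number(index):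
--     if index < 1:
--         return None, None, None, None
--     q, r = divmod(index, 100)
--     z, e, t = _TABLE[r]
--     if q == 0:
--         return 0, z, e, t
--     return q, z, e, EINERNAMEN[q] + "hundert" + t
-- ===== Notes on version B (the rewrite author's own statement) =====
-- stated objective: alternative
-- what changed: Replaces A's recursive self-call and its chain of nine early returns by a precomputed 100-entry lookup table of all two-digit (zehner, einer, text) decompositions (built once from a uniform formula plus a 3-entry special-case dict); the function itself is one divmod, one table index and one hundreds prefix.
import Mathlib
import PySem

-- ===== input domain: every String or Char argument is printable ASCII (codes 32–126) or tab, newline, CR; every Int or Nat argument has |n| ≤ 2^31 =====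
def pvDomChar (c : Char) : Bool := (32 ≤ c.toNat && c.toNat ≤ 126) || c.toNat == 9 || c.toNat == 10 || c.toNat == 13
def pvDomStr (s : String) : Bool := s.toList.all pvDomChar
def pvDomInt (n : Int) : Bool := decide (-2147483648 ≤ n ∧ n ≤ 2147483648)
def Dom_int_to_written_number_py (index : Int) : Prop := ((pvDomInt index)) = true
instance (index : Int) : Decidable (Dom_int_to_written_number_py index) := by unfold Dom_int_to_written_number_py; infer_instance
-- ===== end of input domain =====

-- B replaces A's recursion and branch chain by a precomputed 100-entry lookup table
-- of all two-digit decompositions (alternative decomposition, same O(1) cost).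

-- ===== PORT A =====
-- EINERNAMEN / ZEHNERNAMEN tuples; indexing out of range raises IndexError in Python
-- (excluded by Pre_), here getD "" is only reached outside Pre_.
def EINERNAMEN : List String :=
  ["", "ein", "zwei", "drei", "vier", "fuenf", "sechs", "sieben", "acht", "neun"]
def ZEHNERNAMEN : List String :=
  ["", "", "zwanzig", "dreissig", "vierzig", "fuenfzig", "sechzig", "siebzig", "achtzig", "neunzig"]
def einerAt (i : Int) : String := (PySem.List.pyGet? EINERNAMEN i).getD ""
def zehnerAt (i : Int) : String := (PySem.List.pyGet? ZEHNERNAMEN i).getD ""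

def int_to_written_number_py (index : Int) : Option Int × Option Int × Option Int × Option String :=
  if _h : index ≥ 100 then
    let hunderter := PySem.Int.floordiv index 100
    let r := int_to_written_number_py (PySem.Int.mod index 100)
    let zehner := r.2.1
    let einer := r.2.2.1
    let zet := r.2.2.2
    -- 'if zehner_einer_text' : truthy ⟺ some nonempty string
    let text := match zet with
      | some t => if t ≠ "" then einerAt hunderter ++ "hundert" ++ t
                  else einerAt hunderter ++ "hundert"
      | none => einerAt hunderter ++ "hundert"
    (some hunderter, zehner, einer, some text)
  else if index ≥ 20 then
    let zehner := PySem.Int.floordiv index 10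
    let einer := PySem.Int.mod index 10
    let text := if einer ≠ 0 then einerAt einer ++ "und" ++ zehnerAt zehner else zehnerAt zehner
    (some 0, some zehner, some einer, some text)
  else if index ≥ 13 then
    let einer := PySem.Int.mod index 10
    (some 0, some 1, some einer, some (einerAt einer ++ "zehn"))
  else if index = 12 then (some 0, some 1, some 2, some "zwoelf")
  else if index = 11 then (some 0, some 1, some 1, some "elf")
  else if index = 10 then (some 0, some 1, some 0, some "zehn")
  else if index > 1 then (some 0, some 0, some index, some (einerAt index))
  else if index = 1 then (some 0, some 0, some 1, some "eins")
  else (none, none, none, none)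
termination_by index.toNat
decreasing_by
  have h1 : 0 ≤ PySem.Int.mod index 100 := PySem.Int.mod_nonneg _ (by norm_num)
  have h2 : PySem.Int.mod index 100 < 100 := PySem.Int.mod_lt _ (by norm_num)
  omega

-- ===== PORT B =====
def SPECIAL : PySem.Dict Int String := PySem.Dict.ofList [(1, "eins"), (11, "elf"), (12, "zwoelf")]

def twoDigitText (n : Int) : String :=
  match PySem.Dict.get? SPECIAL n with
  | some s => s
  | none =>
    let z := PySem.Int.floordiv n 10
    let e := PySem.Int.mod n 10
    if n < 10 then einerAt n
    else if n < 20 then einerAt e ++ "zehn"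
    else if e = 0 then zehnerAt z else einerAt e ++ "und" ++ zehnerAt z

-- _TABLE: all 100 two-digit decompositions, built once
def TABLE : List (Option Int × Option Int × String) :=
  (PySem.List.pyRange 0 100 1).map (fun n =>
    if n = 0 then (none, none, "")
    else (some (PySem.Int.floordiv n 10), some (PySem.Int.mod n 10), twoDigitText n))

def int_to_written_number_py_alt (index : Int) : Option Int × Option Int × Option Int × Option String :=
  if index < 1 then (none, none, none, none)
  else
    let q := PySem.Int.floordiv index 100
    let r := PySem.Int.mod index 100
    let p := (PySem.List.pyGet? TABLE r).getD (none, none, "")   -- getD unreachable: 0 ≤ r < 100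
    if q = 0 then (some 0, p.1, p.2.1, some p.2.2)
    else (some q, p.1, p.2.1, some (einerAt q ++ "hundert" ++ p.2.2))

-- ===== PRECONDITION & SPEC =====
-- Pre_ excludes index ≥ 1000: there A raises IndexError (EINERNAMEN[hunderter] with hunderter ≥ 10).
def Pre_int_to_written_number_py (index : Int) : Prop := index < 1000
instance (index : Int) : Decidable (Pre_int_to_written_number_py index) := by unfold Pre_int_to_written_number_py; infer_instance
def pvWitness_int_to_written_number_py : Int := (123)
def Spec_int_to_written_number_py (index : Int) (out : Option Int × Option Int × Option Int × Option String) : Prop := out = int_to_written_number_py_alt index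
instance (index : Int) (out : Option Int × Option Int × Option Int × Option String) : Decidable (Spec_int_to_written_number_py index out) := by unfold Spec_int_to_written_number_py; infer_instance

-- ===== CLAIM (what is proved, stated in full; the proofs are below) =====
def Claim_equal_int_to_written_number_py : Prop := ∀ (index : Int), Dom_int_to_written_number_py index → Pre_int_to_written_number_py index → Spec_int_to_written_number_py index (int_to_written_number_py index)

-- ===== LEMMAS AND PROOFS =====

-- proof-side name for the function mapped over the range when TABLE is built
def entryFor (n : Int) : Option Int × Option Int × String :=
  if n = 0 then (none, none, "")
  else (some (PySem.Int.floordiv n 10), some (PySem.Int.mod n 10), twoDigitText n)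

-- the table lookup at 0 ≤ r < 100 is exactly the mapped function (getD's default unreachable)
theorem table_lookup (r : Int) (h0 : 0 ≤ r) (h1 : r < 100) :
    (PySem.List.pyGet? TABLE r).getD (none, none, "") = entryFor r := by
  have hr : r.toNat < 100 := by omega
  unfold TABLE
  rw [PySem.List.pyGet?_of_nonneg _ h0, PySem.List.pyRange_one]
  simp [hr, entryFor, Int.toNat_of_nonneg h0]

-- A on 0 ≤ r < 100 equals the none-tuple at 0 and B's table entry otherwise.
theorem A_small (r : Int) (h0 : 0 ≤ r) (h1 : r < 100) :
    int_to_written_number_py r =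
      if r = 0 then (none, none, none, none)
      else (some 0, (entryFor r).1, (entryFor r).2.1, some (entryFor r).2.2) := by
  interval_cases r <;>
    · simp [int_to_written_number_py, entryFor, twoDigitText, SPECIAL, einerAt, zehnerAt,
        PySem.Int.floordiv, PySem.Int.mod, PySem.List.pyGet?, PySem.List.pyIdx?,
        PySem.Dict.get?, PySem.Dict.ofList]
      all_goals decide

-- the table text is nonempty for 1 ≤ r < 100
theorem entryFor_ne_empty (r : Int) (h0 : 1 ≤ r) (h1 : r < 100) : (entryFor r).2.2 ≠ "" := by
  interval_cases r <;> decide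

theorem main_eq (index : Int) (hpre : index < 1000) :
    int_to_written_number_py index = int_to_written_number_py_alt index := by
  by_cases hlt : index < 1
  · rw [int_to_written_number_py.eq_def]
    simp only [int_to_written_number_py_alt, if_pos hlt]
    split_ifs <;> first | rfl | omega
  · have hf := PySem.Int.floordiv_mul_add_mod index 100
    have hm0 : 0 ≤ PySem.Int.mod index 100 := PySem.Int.mod_nonneg _ (by norm_num)
    have hm1 : PySem.Int.mod index 100 < 100 := PySem.Int.mod_lt _ (by norm_num)
    by_cases h100 : index < 100
    · have hq : PySem.Int.floordiv index 100 = 0 := by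
        rw [PySem.Int.floordiv_eq_iff_of_pos (by norm_num)]; omega
      have hmm : PySem.Int.mod index 100 = index := by omega
      rw [A_small index (by omega) h100]
      simp only [int_to_written_number_py_alt, if_neg hlt, hq, hmm,
        table_lookup index (by omega) h100,
        if_neg (by omega : ¬ index = 0), if_true]
    · have hq1 : PySem.Int.floordiv index 100 ≠ 0 := by
        intro h; rw [h] at hf; omega
      rw [int_to_written_number_py.eq_def]
      rw [dif_pos (by omega : index ≥ 100)]
      rw [A_small (PySem.Int.mod index 100) hm0 hm1]
      simp only [int_to_written_number_py_alt, if_neg hlt, if_neg hq1,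
        table_lookup (PySem.Int.mod index 100) hm0 hm1]
      by_cases hz : PySem.Int.mod index 100 = 0
      · rw [if_pos hz, hz]
        simp [entryFor]
      · rw [if_neg hz]
        have hne := entryFor_ne_empty (PySem.Int.mod index 100) (by omega) hm1
        generalize hp : entryFor (PySem.Int.mod index 100) = p at hne ⊢
        obtain ⟨z, e, t⟩ := p
        simp [hne]

-- ===== VERDICT (by name: the statement is the Claim_ definition above) =====
theorem int_to_written_number_py_spec : Claim_equal_int_to_written_number_py := by
  intro index _ hpre
  exact main_eq index hpre
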